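-- pv_equiv track=rewrite | github.com/tiancj/rtt_ota_tools | beken_packager.py | crcFast
-- ===== SOURCE A (Python) =====
-- POLYNOMIAL = 32773
--
-- WIDTH = 16
--
-- TOPBIT = 1 << WIDTH - 1
--
-- crcTable = {}
--
-- def crcInit():
--     SHIFT = WIDTH - 8
--     for step in range(0, 256):
--         remainder = step << SHIFT
--         for bit in range(8, 0, -1):
--             if remainder & TOPBIT:
--                 remainder = remainder << 1 & 65535 ^ POLYNOMIAL
--             else:
--                 remainder = remainder << 1
--
--         crcTable[step] = remainder
--
-- def crcFast(message, nBytes):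
--     crcInit()
--     remainder = 65535
--     data = 0
--     byte = 0
--     while byte < nBytes:
--         data = ord(chr(message[byte])) ^ remainder >> WIDTH - 8
--         remainder = crcTable[data] ^ remainder << 8 & 65535
--         byte = byte + 1
--
--     return remainder
-- ===== SOURCE B (Python) =====
-- POLYNOMIAL = 32773
--
-- WIDTH = 16
--
-- TOPBIT = 1 << WIDTH - 1
--
-- def crcFast(message, nBytes):
--     # bitwise CRC-16: no lookup table, only the running 16-bit remainder
--     remainder = 0xFFFF
--     for byte in range(nBytes):
--         remainder ^= (message[byte] & 0xFF) << 8
--         for _ in range(8):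
--             if remainder & TOPBIT:
--                 remainder = (remainder << 1) & 0xFFFF ^ POLYNOMIAL
--             else:
--                 remainder = (remainder << 1) & 0xFFFF
--     return remainder
-- ===== Notes on version B (the rewrite author's own statement) =====
-- stated objective: alternative
-- what changed: Replaces the dict-based 256-entry lookup table (rebuilt by crcInit on every call) with a direct per-bit CRC-16 reduction that maintains only the running remainder.
import Mathlib
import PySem

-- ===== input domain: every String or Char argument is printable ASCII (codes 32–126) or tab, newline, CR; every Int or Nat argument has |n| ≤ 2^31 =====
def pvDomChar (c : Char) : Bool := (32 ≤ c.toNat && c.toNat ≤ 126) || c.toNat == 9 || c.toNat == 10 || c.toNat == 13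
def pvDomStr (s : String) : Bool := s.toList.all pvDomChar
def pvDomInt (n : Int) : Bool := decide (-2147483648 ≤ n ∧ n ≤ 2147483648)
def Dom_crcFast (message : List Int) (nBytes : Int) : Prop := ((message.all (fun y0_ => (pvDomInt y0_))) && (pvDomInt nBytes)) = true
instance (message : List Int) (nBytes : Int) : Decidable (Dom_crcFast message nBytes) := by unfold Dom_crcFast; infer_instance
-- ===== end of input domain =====

-- B replaces A's dict-based 256-entry CRC table (rebuilt on every call) by a direct
-- per-bit CRC-16 reduction that keeps only the running remainder (objective: alternative).

-- ===== PORT A =====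
-- inner loop body of crcInit: `remainder = remainder << 1 & 65535 ^ POLYNOMIAL` / `remainder << 1`
def crcInitBody (remainder : Int) : Int :=
  if PySem.Int.band remainder 32768 ≠ 0 then
    PySem.Int.bxor (PySem.Int.band (remainder <<< (1 : Nat)) 65535) 32773
  else remainder <<< (1 : Nat)

-- body of `for bit in range(8, 0, -1): ...` starting from `step << SHIFT`
def crcInitEntry (step : Int) : Int :=
  (PySem.List.pyRange 8 0 (-1)).foldl (fun remainder _bit => crcInitBody remainder) (step <<< (8 : Nat))

-- crcInit: builds the table dict exactly as A does (`crcTable[step] = remainder`)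
def crcInit : PySem.Dict Int Int :=
  (PySem.List.pyRange 0 256 1).foldl (fun crcTable step => crcTable.insert step (crcInitEntry step))
    PySem.Dict.empty

-- one iteration of A's `while byte < nBytes` loop.
-- ord(chr(b)) is the identity wherever A returns a value (A raises outside Pre_, where the
-- pyGet?/get? fallbacks below are likewise never reached).
def crcFastBody (message : List Int) (crcTable : PySem.Dict Int Int) (remainder byte : Int) : Int :=
  let data := PySem.Int.bxor ((PySem.List.pyGet? message byte).getD 0) (remainder >>> (8 : Nat))
  PySem.Int.bxor ((crcTable.get? data).getD 0) (PySem.Int.band (remainder <<< (8 : Nat)) 65535)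

def crcFast (message : List Int) (nBytes : Int) : Int :=
  (PySem.List.pyRange 0 nBytes 1).foldl (crcFastBody message crcInit) 65535

-- ===== PORT B =====
-- inner 8-step bit reduction of Source B
def crcAltBody (rr : Int) : Int :=
  if PySem.Int.band rr 32768 ≠ 0 then
    PySem.Int.bxor (PySem.Int.band (rr <<< (1 : Nat)) 65535) 32773
  else PySem.Int.band (rr <<< (1 : Nat)) 65535

-- one iteration of Source B's `for byte in range(nBytes)` loop
def crcAltOuter (message : List Int) (remainder byte : Int) : Int :=
  (List.range 8).foldl (fun rr _ => crcAltBody rr)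
    (PySem.Int.bxor remainder
      ((PySem.Int.band ((PySem.List.pyGet? message byte).getD 0) 255) <<< (8 : Nat)))

def crcFast_alt (message : List Int) (nBytes : Int) : Int :=
  (PySem.List.pyRange 0 nBytes 1).foldl (crcAltOuter message) 65535

-- ===== PRECONDITION & SPEC =====
-- Pre_ excludes exactly the inputs where A raises: an index beyond the list (IndexError) or a
-- processed element outside 0..255 (ValueError from chr on negatives/huge ints, KeyError on 256..).
def Pre_crcFast (message : List Int) (nBytes : Int) : Prop :=
  nBytes ≤ message.length ∧ ∀ x ∈ message.take nBytes.toNat, 0 ≤ x ∧ x < 256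

instance (message : List Int) (nBytes : Int) : Decidable (Pre_crcFast message nBytes) := by
  unfold Pre_crcFast; infer_instance

def pvWitness_crcFast : List Int × Int := ([1, 2, 250], 3)

def Spec_crcFast (message : List Int) (nBytes : Int) (out : Int) : Prop := out = crcFast_alt message nBytes
instance (message : List Int) (nBytes : Int) (out : Int) : Decidable (Spec_crcFast message nBytes out) := by unfold Spec_crcFast; infer_instance

-- ===== CLAIM (what is proved, stated in full; the proofs are below) =====
def Claim_equal_crcFast : Prop := ∀ (message : List Int) (nBytes : Int), Dom_crcFast message nBytes → Pre_crcFast message nBytes → Spec_crcFast message nBytes (crcFast message nBytes)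

-- ===== LEMMAS AND PROOFS =====

-- Nat model of one bit-reduction step (both programs' inner step, on 16-bit states)
def pvStep (x : Nat) : Nat :=
  if x.testBit 15 then ((x <<< 1) &&& 65535) ^^^ 32773 else (x <<< 1) &&& 65535

lemma pv_and65535 (x : Nat) : x &&& 65535 = x % 65536 := by
  have h := Nat.and_two_pow_sub_one_eq_mod x 16
  norm_num at h ⊢; omega

lemma pv_and255 (x : Nat) : x &&& 255 = x % 256 := by
  have h := Nat.and_two_pow_sub_one_eq_mod x 8
  norm_num at h ⊢; omega

lemma pv_tb15 (x : Nat) : x.testBit 15 = decide (x / 32768 % 2 = 1) := by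
  rw [Nat.testBit, Nat.shiftRight_eq_div_pow]
  norm_num
  cases h : decide (x / 32768 % 2 = 1) <;> simp_all

lemma pv_band32768 (x : Nat) : (x &&& 32768 ≠ 0) ↔ x.testBit 15 = true := by
  have h := Nat.and_two_pow x 15
  norm_num at h
  rw [h]
  cases hb : x.testBit 15 <;> simp

lemma pvStep_lt (x : Nat) : pvStep x < 65536 := by
  unfold pvStep
  split
  · exact Nat.xor_lt_two_pow (n := 16) (by rw [pv_and65535]; omega) (by norm_num)
  · rw [pv_and65535]; omega

-- one linear step: xor-ing in a low offset commutes with pvStep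
lemma pvStep_xor (a c : Nat) (hc : c < 32768) : pvStep (a ^^^ c) = pvStep a ^^^ (c <<< 1) := by
  have htb : c.testBit 15 = false := by rw [pv_tb15]; simp; omega
  have hcond : (a ^^^ c).testBit 15 = a.testBit 15 := by
    rw [Nat.testBit_xor, htb, Bool.xor_false]
  have hmask : (c <<< 1) &&& 65535 = c <<< 1 := by
    rw [pv_and65535, Nat.shiftLeft_eq]; omega
  unfold pvStep
  rw [hcond, Nat.shiftLeft_xor_distrib, Nat.and_xor_distrib_right, hmask]
  split
  · rw [Nat.xor_assoc, Nat.xor_assoc, Nat.xor_comm (c <<< 1) 32773]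
  · rfl

-- iterated linearity: the low offset just shifts along
lemma pvStep_iter_xor (k : Nat) : ∀ (a c : Nat), c * 2 ^ k < 65536 →
    pvStep^[k] (a ^^^ c) = pvStep^[k] a ^^^ (c <<< k) := by
  induction k with
  | zero => intro a c _; simp
  | succ k ih =>
    intro a c hc
    have h2 : (2:Nat) ^ (k+1) = 2 ^ k * 2 := by ring
    have hc1 : c < 32768 := by nlinarith [Nat.one_le_two_pow (n := k)]
    rw [Function.iterate_succ_apply, Function.iterate_succ_apply, pvStep_xor a c hc1,
      ih (pvStep a) (c <<< 1) (by rw [Nat.shiftLeft_eq]; nlinarith),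
      show c <<< 1 <<< k = c <<< (k+1) by rw [Nat.add_comm k 1]; exact Eq.symm (Nat.shiftLeft_add c 1 k)]

-- the pure bit identity behind table-driven = bitwise
lemma pv_decomp (r b : Nat) : r ^^^ (b <<< 8) = ((b ^^^ (r >>> 8)) <<< 8) ^^^ (r &&& 255) := by
  apply Nat.eq_of_testBit_eq
  intro i
  simp only [Nat.testBit_xor, Nat.testBit_shiftLeft, Nat.testBit_shiftRight, Nat.testBit_and]
  by_cases h : 8 ≤ i
  · have h255 : (255 : Nat).testBit i = false := by
      rw [show (255:Nat) = 2^8 - 1 by norm_num, Nat.testBit_two_pow_sub_one]; simpa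
    have : 8 + (i - 8) = i := by omega
    simp [h, h255, this, Bool.xor_comm]
  · have h255 : (255 : Nat).testBit i = true := by
      rw [show (255:Nat) = 2^8 - 1 by norm_num, Nat.testBit_two_pow_sub_one]; simpa using by omega
    simp [h, h255, Bool.xor_comm]

lemma pv_shiftmask (r : Nat) : (r <<< 8) &&& 65535 = (r &&& 255) <<< 8 := by
  apply Nat.eq_of_testBit_eq
  intro i
  simp only [Nat.testBit_and, Nat.testBit_shiftLeft]
  by_cases h : 8 ≤ i
  · by_cases h16 : i < 16
    · have t1 : (65535 : Nat).testBit i = true := by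
        rw [show (65535:Nat) = 2^16 - 1 by norm_num, Nat.testBit_two_pow_sub_one]; simpa
      have t2 : (255 : Nat).testBit (i - 8) = true := by
        rw [show (255:Nat) = 2^8 - 1 by norm_num, Nat.testBit_two_pow_sub_one]; simpa using by omega
      simp [h, t1, t2]
    · have t1 : (65535 : Nat).testBit i = false := by
        rw [show (65535:Nat) = 2^16 - 1 by norm_num, Nat.testBit_two_pow_sub_one]; simpa using by omega
      have t2 : (255 : Nat).testBit (i - 8) = false := by
        rw [show (255:Nat) = 2^8 - 1 by norm_num, Nat.testBit_two_pow_sub_one]; simpa using by omega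
      simp [h, t1, t2]
  · simp [h]

-- the per-byte core: A's table step equals B's 8-bit reduction (Nat level)
lemma pv_core (m r : Nat) (hm : m < 256) :
    pvStep^[8] ((m ^^^ (r >>> 8)) <<< 8) ^^^ ((r <<< 8) &&& 65535)
      = pvStep^[8] (r ^^^ ((m &&& 255) <<< 8)) := by
  have hm' : m &&& 255 = m := by rw [pv_and255]; omega
  rw [hm', pv_decomp r m,
    pvStep_iter_xor 8 ((m ^^^ r >>> 8) <<< 8) (r &&& 255) (by rw [pv_and255]; norm_num; omega),
    pv_shiftmask]

-- casts between the Int ports and the Nat model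
lemma pv_castA (x : Nat) (h : x < 65536) : crcInitBody (x : Nat) = ((pvStep x : Nat) : Int) := by
  unfold crcInitBody pvStep
  have hsh : ((x : Int) <<< (1 : Nat)) = ((x <<< 1 : Nat) : Int) := by simp
  have hcond : (PySem.Int.band (x : Int) 32768 ≠ 0) ↔ x.testBit 15 = true := by
    rw [show (32768 : Int) = ((32768 : Nat) : Int) by norm_num, PySem.Int.band_natCast]
    rw [show ((((x &&& 32768 : Nat)) : Int) ≠ 0) ↔ (x &&& 32768 ≠ 0) by exact_mod_cast Int.natCast_ne_zero]
    exact pv_band32768 x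
  by_cases hb : x.testBit 15
  · rw [if_pos (hcond.mpr hb), if_pos hb, hsh]
    rw [show (65535 : Int) = ((65535 : Nat) : Int) by norm_num, PySem.Int.band_natCast,
      show (32773 : Int) = ((32773 : Nat) : Int) by norm_num, PySem.Int.bxor_natCast]
  · rw [if_neg (fun hh => hb (hcond.mp hh)), if_neg (by simpa using hb), hsh]
    have : x < 32768 := by rw [pv_tb15] at hb; simp at hb; omega
    congr 1
    rw [pv_and65535, Nat.shiftLeft_eq]; omega

lemma pv_castB (x : Nat) : crcAltBody (x : Nat) = ((pvStep x : Nat) : Int) := by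
  unfold crcAltBody pvStep
  have hsh : ((x : Int) <<< (1 : Nat)) = ((x <<< 1 : Nat) : Int) := by simp
  have hcond : (PySem.Int.band (x : Int) 32768 ≠ 0) ↔ x.testBit 15 = true := by
    rw [show (32768 : Int) = ((32768 : Nat) : Int) by norm_num, PySem.Int.band_natCast]
    rw [show ((((x &&& 32768 : Nat)) : Int) ≠ 0) ↔ (x &&& 32768 ≠ 0) by exact_mod_cast Int.natCast_ne_zero]
    exact pv_band32768 x
  by_cases hb : x.testBit 15
  · rw [if_pos (hcond.mpr hb), if_pos hb, hsh]
    rw [show (65535 : Int) = ((65535 : Nat) : Int) by norm_num, PySem.Int.band_natCast,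
      show (32773 : Int) = ((32773 : Nat) : Int) by norm_num, PySem.Int.bxor_natCast]
  · rw [if_neg (fun hh => hb (hcond.mp hh)), if_neg (by simpa using hb), hsh]
    rw [show (65535 : Int) = ((65535 : Nat) : Int) by norm_num, PySem.Int.band_natCast]

-- folds of the inner bodies compute iterated pvStep
lemma pv_foldA (l : List Int) : ∀ (x : Nat), x < 65536 →
    l.foldl (fun remainder _bit => crcInitBody remainder) (x : Nat) = ((pvStep^[l.length] x : Nat) : Int) := by
  induction l with
  | nil => intro x _; simp
  | cons a t ih =>
    intro x hx
    rw [List.foldl_cons, pv_castA x hx, ih (pvStep x) (pvStep_lt x), List.length_cons,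
      Function.iterate_succ_apply]

lemma pv_foldB (l : List Nat) : ∀ (x : Nat),
    l.foldl (fun rr _ => crcAltBody rr) (x : Nat) = ((pvStep^[l.length] x : Nat) : Int) := by
  induction l with
  | nil => intro x; simp
  | cons a t ih =>
    intro x
    rw [List.foldl_cons, pv_castB x, ih (pvStep x), List.length_cons, Function.iterate_succ_apply]

-- dict built by inserting distinct keys: lookup of an absent key falls through
lemma pv_table_out (l : List Int) : ∀ (d0 : PySem.Dict Int Int) (k : Int), k ∉ l →
    ((l.foldl (fun t s => t.insert s (crcInitEntry s)) d0).get? k) = d0.get? k := by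
  induction l with
  | nil => intro d0 k _; rfl
  | cons a t ih =>
    intro d0 k hk
    rw [List.foldl_cons, ih _ k (fun h => hk (List.mem_cons_of_mem a h)),
      PySem.Dict.get?_insert_of_ne _ _ (fun h => hk (by rw [h]; exact List.mem_cons_self))]

lemma pv_table_get (l : List Int) : ∀ (d0 : PySem.Dict Int Int) (k : Int), l.Nodup → k ∈ l →
    ((l.foldl (fun t s => t.insert s (crcInitEntry s)) d0).get? k) = some (crcInitEntry k) := by
  induction l with
  | nil => intro _ _ _ h; cases h
  | cons a t ih =>
    intro d0 k hnd hk
    rw [List.foldl_cons]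
    rcases List.mem_cons.mp hk with rfl | hmem
    · rw [pv_table_out t _ k (List.Nodup.notMem hnd), PySem.Dict.get?_insert_self]
    · exact ih _ k (List.Nodup.of_cons hnd) hmem

-- A's table entry, at Nat level
lemma pv_entry (d : Nat) (hd : d < 256) :
    crcInitEntry (d : Nat) = ((pvStep^[8] (d <<< 8) : Nat) : Int) := by
  unfold crcInitEntry
  have hsh : ((d : Int) <<< (8 : Nat)) = ((d <<< 8 : Nat) : Int) := by simp
  rw [hsh, show PySem.List.pyRange 8 0 (-1) = [8, 7, 6, 5, 4, 3, 2, 1] from by decide,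
    pv_foldA [8, 7, 6, 5, 4, 3, 2, 1] (d <<< 8) (by rw [Nat.shiftLeft_eq]; omega)]
  norm_num

-- the per-byte step functions agree on 16-bit states and byte values 0..255
lemma pv_step_eq (message : List Int) (r m : Nat) (i : Int) (hr : r < 65536)
    (hget : PySem.List.pyGet? message i = some ((m : Nat) : Int)) (hm : m < 256) :
    crcFastBody message crcInit (r : Nat) i
      = ((pvStep^[8] (r ^^^ ((m &&& 255) <<< 8)) : Nat) : Int) ∧
    crcAltOuter message (r : Nat) i
      = ((pvStep^[8] (r ^^^ ((m &&& 255) <<< 8)) : Nat) : Int) := by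
  have hshr : ((r : Int) >>> (8 : Nat)) = ((r >>> 8 : Nat) : Int) := by simp
  have hshl : ((r : Int) <<< (8 : Nat)) = ((r <<< 8 : Nat) : Int) := by simp
  have hd : m ^^^ (r >>> 8) < 256 := by
    apply Nat.xor_lt_two_pow (n := 8) hm
    rw [Nat.shiftRight_eq_div_pow]; omega
  constructor
  · unfold crcFastBody
    rw [hget]
    simp only [Option.getD_some]
    unfold crcInit
    rw [hshr, PySem.Int.bxor_natCast,
      pv_table_get (PySem.List.pyRange 0 256 1) PySem.Dict.empty _
        (PySem.List.nodup_pyRange_one 0 256)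
        (PySem.List.mem_pyRange_one.mpr
          ⟨Int.natCast_nonneg _, by exact_mod_cast hd⟩),
      pv_entry _ hd]
    simp only [Option.getD_some]
    rw [hshl, show (65535 : Int) = ((65535 : Nat) : Int) by norm_num, PySem.Int.band_natCast,
      PySem.Int.bxor_natCast]
    exact_mod_cast pv_core m r hm
  · unfold crcAltOuter
    rw [hget]
    simp only [Option.getD_some]
    rw [show (255 : Int) = ((255 : Nat) : Int) by norm_num, PySem.Int.band_natCast]
    have hsh2 : (((m &&& 255 : Nat) : Int) <<< (8 : Nat)) = (((m &&& 255) <<< 8 : Nat) : Int) := by simp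
    rw [hsh2, PySem.Int.bxor_natCast, pv_foldB (List.range 8) (r ^^^ (m &&& 255) <<< 8)]
    simp

-- the two outer folds stay equal along any list of good indices
lemma pv_outer (message : List Int) (l : List Int) : ∀ (r : Nat), r < 65536 →
    (∀ i ∈ l, ∃ m : Nat, PySem.List.pyGet? message i = some ((m : Nat) : Int) ∧ m < 256) →
    l.foldl (crcFastBody message crcInit) (r : Nat) = l.foldl (crcAltOuter message) (r : Nat) := by
  induction l with
  | nil => intro r _ _; simp
  | cons a t ih =>
    intro r hr hgood
    obtain ⟨m, hget, hm⟩ := hgood a List.mem_cons_self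
    obtain ⟨hA, hB⟩ := pv_step_eq message r m a hr hget hm
    rw [List.foldl_cons, List.foldl_cons, hA, hB]
    apply ih
    · rw [show (8:Nat) = 7 + 1 by norm_num, Function.iterate_succ_apply']
      exact pvStep_lt _
    · intro i hi; exact hgood i (List.mem_cons_of_mem a hi)

-- ===== VERDICT (by name: the statement is the Claim_ definition above) =====
theorem crcFast_spec : Claim_equal_crcFast := by
  intro message nBytes _hdom hpre
  obtain ⟨hlen, hbytes⟩ := hpre
  unfold Spec_crcFast crcFast crcFast_alt
  rw [show (65535 : Int) = ((65535 : Nat) : Int) by norm_num]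
  apply pv_outer message _ 65535 (by norm_num)
  intro i hi
  obtain ⟨h0, hn⟩ := PySem.List.mem_pyRange_one.mp hi
  have hidx : i.toNat < message.length := by omega
  have hget : PySem.List.pyGet? message i = some message[i.toNat] := by
    rw [PySem.List.pyGet?_of_nonneg _ h0, List.getElem?_eq_getElem hidx]
  have hmem : message[i.toNat] ∈ message.take nBytes.toNat := by
    have hlt : i.toNat < nBytes.toNat := by omega
    have : (message.take nBytes.toNat)[i.toNat]'(by simpa [List.length_take] using by omega)
        = message[i.toNat] := List.getElem_take
    exact this ▸ List.getElem_mem _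
  obtain ⟨hge, hlt⟩ := hbytes _ hmem
  refine ⟨message[i.toNat].toNat, ?_, ?_⟩
  · rw [hget]; congr 1; omega
  · omega
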